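-- pv_equiv track=rewrite | github.com/Siddhant-21-03/Clara | scripts/prompt_generator.py | _make_after_hours_greeting
-- ===== SOURCE A (Python) =====
-- def _make_after_hours_greeting(greeting: str, company: str) -> str:
--     """Generate after-hours version of the greeting."""
--     if not greeting:
--         return f"Thank you for calling {company}. I appreciate you calling. Please note our office is currently closed."
--     result = greeting
--     for phrase in ['how may I help you today?', 'How can I assist you?', 'How can I help you?',
--                    'how can I assist you?', 'how can I help you?', 'How may I help you today?']:
--         result = result.replace(phrase, 'I appreciate you calling. Please note our office is currently closed.')
--     return result
-- ===== SOURCE B (Python) =====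
-- _PHRASES = ['how may I help you today?', 'How can I assist you?', 'How can I help you?',
--             'how can I assist you?', 'how can I help you?', 'How may I help you today?']
-- _CLOSED = 'I appreciate you calling. Please note our office is currently closed.'
--
-- def _make_after_hours_greeting(greeting: str, company: str) -> str:
--     """Single left-to-right scan: at each position emit the closing message for a
--     matching phrase (phrases never overlap each other), otherwise copy the char."""
--     if not greeting:
--         return f"Thank you for calling {company}. I appreciate you calling. Please note our office is currently closed."
--     out = []
--     i = 0
--     n = len(greeting)
--     while i < n:
--         for p in _PHRASES:
--             if greeting.startswith(p, i):
--                 out.append(_CLOSED)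
--                 i += len(p)
--                 break
--         else:
--             out.append(greeting[i])
--             i += 1
--     return ''.join(out)
-- ===== Notes on version B (the rewrite author's own statement) =====
-- stated objective: alternative
-- what changed: A makes six sequential full-string str.replace passes (one per phrase); B makes a single left-to-right scan that at each position matches any of the six phrases in place and otherwise copies the character (the phrases never overlap one another and the closing message can create no new match, so the results coincide).
import Mathlib
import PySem

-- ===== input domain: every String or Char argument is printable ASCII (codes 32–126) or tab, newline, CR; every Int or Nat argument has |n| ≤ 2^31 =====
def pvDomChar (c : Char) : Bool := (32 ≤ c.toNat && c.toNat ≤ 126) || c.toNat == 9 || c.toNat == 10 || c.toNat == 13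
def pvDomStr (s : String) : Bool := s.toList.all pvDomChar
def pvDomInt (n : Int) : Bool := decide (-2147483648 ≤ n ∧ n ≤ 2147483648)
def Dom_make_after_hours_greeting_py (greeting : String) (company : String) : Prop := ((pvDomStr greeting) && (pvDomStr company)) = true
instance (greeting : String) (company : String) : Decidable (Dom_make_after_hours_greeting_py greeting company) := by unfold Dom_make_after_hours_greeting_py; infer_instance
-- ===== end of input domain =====

-- B replaces A's six sequential full-string `str.replace` passes by one single left-to-right
-- scan that matches any of the six phrases in place (objective: alternative; not measured faster).

-- ===== PORT A =====
-- the six greeting phrases, in A's order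
def pvPhrasesA : List String :=
  ["how may I help you today?", "How can I assist you?", "How can I help you?",
   "how can I assist you?", "how can I help you?", "How may I help you today?"]

def pvClosedA : String := "I appreciate you calling. Please note our office is currently closed."

def make_after_hours_greeting_py (greeting : String) (company : String) : String :=
  if greeting = "" then
    "Thank you for calling " ++ company ++ ". I appreciate you calling. Please note our office is currently closed."
  else
    pvPhrasesA.foldl (fun result phrase => PySem.Str.replace result phrase pvClosedA) greeting

-- ===== PORT B =====
-- B-side literals, on the char-list side
def pvPhrasesB : List (List Char) :=
  ["how may I help you today?".toList, "How can I assist you?".toList, "How can I help you?".toList,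
   "how can I assist you?".toList, "how can I help you?".toList, "How may I help you today?".toList]

def pvClosedB : List Char := "I appreciate you calling. Please note our office is currently closed.".toList

-- B's while-loop: at each position, the first phrase (in list order) that starts here is
-- replaced by the closing message and skipped, otherwise the char is copied.
-- fuel = number of loop iterations left (each iteration consumes ≥ 1 char; started at s.length).
def pvScanGo (ps : List (List Char)) : Nat → List Char → List Char
  | _, [] => []
  | 0, _ :: _ => []
  | fuel+1, c :: t =>
    match ps.find? (fun p => p.isPrefixOf (c :: t)) with
    | some p => pvClosedB ++ pvScanGo ps fuel ((c :: t).drop p.length)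
    | none => c :: pvScanGo ps fuel t

def pvScan (ps : List (List Char)) (s : List Char) : List Char := pvScanGo ps s.length s

def make_after_hours_greeting_py_alt (greeting : String) (company : String) : String :=
  if greeting = "" then
    "Thank you for calling " ++ company ++ ". I appreciate you calling. Please note our office is currently closed."
  else
    String.ofList (pvScan pvPhrasesB greeting.toList)

-- ===== PRECONDITION & SPEC =====
def Spec_make_after_hours_greeting_py (greeting : String) (company : String) (out : String) : Prop := out = make_after_hours_greeting_py_alt greeting company
instance (greeting : String) (company : String) (out : String) : Decidable (Spec_make_after_hours_greeting_py greeting company out) := by unfold Spec_make_after_hours_greeting_py; infer_instance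

-- ===== CLAIM (what is proved, stated in full; the proofs are below) =====
def Claim_equal_make_after_hours_greeting_py : Prop := ∀ (greeting : String) (company : String), Dom_make_after_hours_greeting_py greeting company → Spec_make_after_hours_greeting_py greeting company (make_after_hours_greeting_py greeting company)

-- ===== LEMMAS AND PROOFS =====

-- notation shortcuts for the proofs
def pvRepl (s old : List Char) : List Char := PySem.Chars.replace s old pvClosedB

-- ## facts about the literal phrases (finite checks)

-- every phrase is nonempty, of length ≤ 25, and the phrases are pairwise distinct
theorem pvPhrase_ne_nil : ∀ p ∈ pvPhrasesB, p ≠ [] := by decide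
theorem pvPhrase_len_le : ∀ p ∈ pvPhrasesB, p.length ≤ 25 := by decide
-- no occurrence of a phrase q can start strictly inside another occurrence region of phrase p
-- (k = 0 with p = q excluded): neither q within/straddling p's occurrence
theorem pvPair : ∀ p ∈ pvPhrasesB, ∀ q ∈ pvPhrasesB, ∀ k < p.length,
    (k ≠ 0 ∨ p ≠ q) → ¬ q <+: p.drop k ∧ ¬ p.drop k <+: q := by decide
-- no nonempty suffix of a phrase is a prefix of the closing message
theorem pvSufR : ∀ p ∈ pvPhrasesB, ∀ k < p.length, ¬ p.drop k <+: pvClosedB := by decide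
-- no occurrence of a phrase can start inside an inserted closing message
theorem pvRStraddle : ∀ p ∈ pvPhrasesB, ∀ k < pvClosedB.length,
    ¬ p <+: pvClosedB.drop k ∧ ¬ pvClosedB.drop k <+: p := by decide
theorem pvClosedB_len : pvClosedB.length = 69 := by decide

-- ## generic list facts
theorem pv_prefix_append_cases {l u w : List Char} (h : l <+: u ++ w) : l <+: u ∨ u <+: l :=
  List.prefix_or_prefix_of_prefix h (List.prefix_append u w)

theorem pv_suffix_eq_drop {q l : List Char} (h : q <:+ l) : ∃ k < l.length + 1, q = l.drop k := by
  obtain ⟨r, rfl⟩ := h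
  exact ⟨r.length, by simp, by simp⟩


-- ## facts about PySem.Chars.replace's fuelled loop
theorem pvGo_acc (old new : List Char) : ∀ (f : Nat) (l acc : List Char),
    PySem.Chars.replace.go old new f l acc = acc.reverse ++ PySem.Chars.replace.go old new f l [] := by
  intro f
  induction f with
  | zero => intro l acc; simp [PySem.Chars.replace.go]
  | succ f ih =>
    intro l acc
    cases l with
    | nil => simp [PySem.Chars.replace.go]
    | cons c t =>
      simp only [PySem.Chars.replace.go]
      by_cases h : old.isPrefixOf (c :: t)
      · simp only [h, if_true]
        rw [ih _ (new.reverse ++ acc), ih _ (new.reverse ++ [])]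
        simp
      · simp only [h]
        rw [ih _ (c :: acc), ih _ [c]]
        simp

theorem pvGo_fuel (old new : List Char) (hold : old ≠ []) : ∀ (f₁ : Nat) (l : List Char) (f₂ : Nat) (acc : List Char),
    l.length ≤ f₁ → l.length ≤ f₂ →
    PySem.Chars.replace.go old new f₁ l acc = PySem.Chars.replace.go old new f₂ l acc := by
  intro f₁
  induction f₁ with
  | zero =>
    intro l f₂ acc h1 h2
    have hl : l = [] := by cases l with | nil => rfl | cons a b => simp at h1
    subst hl
    cases f₂ <;> simp [PySem.Chars.replace.go]
  | succ f ih =>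
    intro l f₂ acc h1 h2
    cases l with
    | nil => cases f₂ <;> simp [PySem.Chars.replace.go]
    | cons c t =>
      cases f₂ with
      | zero => simp at h2
      | succ g =>
        simp only [PySem.Chars.replace.go]
        by_cases h : old.isPrefixOf (c :: t)
        · simp only [h, if_true]
          have hol : 1 ≤ old.length := by
            cases old with | nil => exact absurd rfl hold | cons _ _ => simp
          apply ih
          · simp at h1 ⊢; omega
          · simp at h2 ⊢; omega
        · simp only [h]
          apply ih
          · simp at h1; omega
          · simp at h2; omega

theorem pvRepl_def {s old : List Char} (h : old ≠ []) :
    pvRepl s old = PySem.Chars.replace.go old pvClosedB s.length s [] := by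
  simp [pvRepl, PySem.Chars.replace, List.isEmpty_iff, h]

-- ## characterisation of PySem.Chars.replace (nonempty pattern)
theorem pvRepl_nil {old : List Char} (h : old ≠ []) : pvRepl [] old = [] := by
  rw [pvRepl_def h]; simp [PySem.Chars.replace.go]

theorem pvRepl_cons_nomatch {old : List Char} (h : old ≠ []) {c : Char} {t : List Char}
    (hm : ¬ old <+: c :: t) : pvRepl (c :: t) old = c :: pvRepl t old := by
  rw [pvRepl_def h, pvRepl_def h]
  have hb : old.isPrefixOf (c :: t) = false := by
    rw [Bool.eq_false_iff]; intro hc; exact hm (List.isPrefixOf_iff_prefix.mp hc)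
  simp only [List.length_cons, PySem.Chars.replace.go, hb, Bool.false_eq_true, if_false]
  rw [pvGo_acc]
  simp

theorem pvRepl_match {old s : List Char} (h : old ≠ []) (hm : old <+: s) :
    pvRepl s old = pvClosedB ++ pvRepl (s.drop old.length) old := by
  cases s with
  | nil =>
    exfalso; exact h (List.prefix_nil.mp hm)
  | cons c t =>
    rw [pvRepl_def h, pvRepl_def h]
    have hb : old.isPrefixOf (c :: t) = true := List.isPrefixOf_iff_prefix.mpr hm
    simp only [List.length_cons, PySem.Chars.replace.go, hb, if_true]
    rw [pvGo_acc]
    have hol : 1 ≤ old.length := by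
      cases old with | nil => exact absurd rfl h | cons _ _ => simp
    rw [pvGo_fuel old pvClosedB h t.length ((c :: t).drop old.length) ((c :: t).drop old.length).length []
      (by simp; omega) (by simp)]
    simp

-- replace passes unchanged over a block u in which no occurrence of old can start
theorem pvRepl_pass {old : List Char} (h : old ≠ []) :
    ∀ u w, (∀ k < u.length, ¬ old <+: u.drop k ∧ ¬ u.drop k <+: old) →
      pvRepl (u ++ w) old = u ++ pvRepl w old := by
  intro u
  induction u with
  | nil => intro w _; simp
  | cons c u' ih =>
    intro w hk
    have h0 := hk 0 (by simp)
    have hnm : ¬ old <+: c :: (u' ++ w) := by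
      intro hc
      rcases pv_prefix_append_cases (show old <+: (c :: u') ++ w by simpa using hc) with hc' | hc'
      · exact h0.1 (by simpa using hc')
      · exact h0.2 (by simpa using hc')
    rw [List.cons_append, pvRepl_cons_nomatch h hnm, ih w (fun k hk' => hk (k+1) (by simpa using Nat.succ_lt_succ hk'))]
    rfl

-- ## characterisation of the scan
theorem pvScan_nil (ps : List (List Char)) : pvScan ps [] = [] := rfl

theorem pvScanGo_fuel {ps : List (List Char)} (hne : ∀ p ∈ ps, p ≠ []) :
    ∀ (f₁ : Nat) (l : List Char) (f₂ : Nat), l.length ≤ f₁ → l.length ≤ f₂ →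
      pvScanGo ps f₁ l = pvScanGo ps f₂ l := by
  intro f₁
  induction f₁ with
  | zero =>
    intro l f₂ h1 h2
    have hl : l = [] := by cases l with | nil => rfl | cons a b => simp at h1
    subst hl
    cases f₂ <;> simp [pvScanGo]
  | succ f ih =>
    intro l f₂ h1 h2
    cases l with
    | nil => cases f₂ <;> simp [pvScanGo]
    | cons c t =>
      cases f₂ with
      | zero => simp at h2
      | succ g =>
        simp only [pvScanGo]
        cases h : ps.find? (fun p => p.isPrefixOf (c :: t)) with
        | none =>
          dsimp only
          rw [ih t g (by simpa using h1) (by simpa using h2)]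
        | some p =>
          have hpl : 1 ≤ p.length := by
            have := hne p (List.mem_of_find?_eq_some h)
            cases p with | nil => simp at this | cons _ _ => simp
          dsimp only
          rw [ih ((c :: t).drop p.length) g (by simp at h1 ⊢; omega) (by simp at h2 ⊢; omega)]

theorem pvScan_cons_none {ps : List (List Char)} {c : Char} {t : List Char}
    (h : ps.find? (fun p => p.isPrefixOf (c :: t)) = none) :
    pvScan ps (c :: t) = c :: pvScan ps t := by
  simp only [pvScan, List.length_cons, pvScanGo, h]

theorem pvScan_cons_some {ps : List (List Char)} (hne : ∀ p ∈ ps, p ≠ []) {c : Char} {t : List Char}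
    {p : List Char} (h : ps.find? (fun p => p.isPrefixOf (c :: t)) = some p) :
    pvScan ps (c :: t) = pvClosedB ++ pvScan ps ((c :: t).drop p.length) := by
  have hpl : 1 ≤ p.length := by
    have := hne p (List.mem_of_find?_eq_some h)
    cases p with | nil => simp at this | cons _ _ => simp
  simp only [pvScan, List.length_cons, pvScanGo, h]
  rw [pvScanGo_fuel hne t.length ((c :: t).drop p.length) ((c :: t).drop p.length).length
    (by simp; omega) (by simp)]

-- scan with no phrases is the identity
theorem pvScan_nil_phrases : ∀ s, pvScan [] s = s := by
  have go : ∀ (f : Nat) (l : List Char), l.length ≤ f → pvScanGo [] f l = l := by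
    intro f
    induction f with
    | zero =>
      intro l h1
      cases l with | nil => rfl | cons a b => simp at h1
    | succ f ih =>
      intro l h1
      cases l with
      | nil => rfl
      | cons c t => simp only [pvScanGo, List.find?_nil]; rw [ih t (by simpa using h1)]
  intro s
  exact go s.length s le_rfl

-- scan passes unchanged over a block u in which no phrase of ps can start
theorem pvScan_pass {ps : List (List Char)} :
    ∀ u w, (∀ q ∈ ps, ∀ k < u.length, ¬ q <+: (u ++ w).drop k) →
      pvScan ps (u ++ w) = u ++ pvScan ps w := by
  intro u
  induction u with
  | nil => intro w _; simp
  | cons c u' ih =>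
    intro w hk
    have hfind : ps.find? (fun p => p.isPrefixOf (c :: (u' ++ w))) = none := by
      refine List.find?_eq_none.mpr (fun q hq => ?_)
      intro hc
      have hpre : q <+: c :: (u' ++ w) := List.isPrefixOf_iff_prefix.mp (by simpa using hc)
      exact hk q hq 0 (by simp) (by simpa using hpre)
    rw [List.cons_append, pvScan_cons_none hfind,
      ih w (fun q hq k hk' => by simpa using hk q hq (k+1) (by simpa using Nat.succ_lt_succ hk'))]
    rfl

-- a nonempty suffix q of a phrase that does not occur at the head of s does not occur
-- at the head of the scanned string either (scan inserts only pvClosedB, which q cannot start in)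
theorem pvScan_no_new_head {ps : List (List Char)} (hsub : ∀ p ∈ ps, p ∈ pvPhrasesB) :
    ∀ s q, (∃ p ∈ pvPhrasesB, q <:+ p) → q ≠ [] → ¬ q <+: s → ¬ q <+: pvScan ps s := by
  have hne : ∀ p ∈ ps, p ≠ [] := fun q hq => pvPhrase_ne_nil q (hsub q hq)
  suffices H : ∀ n s q, s.length ≤ n → (∃ p ∈ pvPhrasesB, q <:+ p) → q ≠ [] → ¬ q <+: s → ¬ q <+: pvScan ps s by
    exact fun s q => H s.length s q le_rfl
  intro n
  induction n with
  | zero =>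
    intro s q hn h1 h2 h3
    have hs : s = [] := by cases s with | nil => rfl | cons a b => simp at hn
    subst hs
    rw [pvScan_nil]
    intro hc
    exact h2 (List.prefix_nil.mp hc)
  | succ n ih =>
    intro s q hn h1 h2 h3
    obtain ⟨p0, hp0, hq0⟩ := h1
    cases s with
    | nil =>
      rw [pvScan_nil]
      intro hc
      exact h2 (List.prefix_nil.mp hc)
    | cons c t =>
      cases hfind : ps.find? (fun p => p.isPrefixOf (c :: t)) with
      | some pm =>
        rw [pvScan_cons_some hne hfind]
        intro hc
        rcases pv_prefix_append_cases hc with hc | hc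
        · obtain ⟨k, hk, hkq⟩ := pv_suffix_eq_drop hq0
          subst hkq
          have hklt : k < p0.length := by
            by_contra hge
            push Not at hge
            exact h2 (List.drop_eq_nil_of_le hge)
          exact pvSufR p0 hp0 k hklt hc
        · have h69 : pvClosedB.length ≤ q.length := hc.length_le
          have h25 : q.length ≤ 25 := le_trans hq0.length_le (pvPhrase_len_le p0 hp0)
          rw [pvClosedB_len] at h69
          omega
      | none =>
        rw [pvScan_cons_none hfind]
        intro hc
        cases q with
        | nil => exact h2 rfl
        | cons a q' =>
          rw [List.cons_prefix_cons] at hc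
          obtain ⟨rfl, hq'⟩ := hc
          cases q' with
          | nil => exact h3 (by simp)
          | cons b q'' =>
            exact ih t (b :: q'') (by simpa using hn)
              ⟨p0, hp0, (List.suffix_cons a (b :: q'')).trans hq0⟩
              (by simp)
              (fun hpt => h3 (List.cons_prefix_cons.mpr ⟨rfl, hpt⟩)) hq'

-- ## the key step: folding one more replace into the scan
theorem pvStep {ps : List (List Char)} {p : List Char}
    (hsub : ∀ q ∈ ps, q ∈ pvPhrasesB) (hp : p ∈ pvPhrasesB) (hne : ∀ q ∈ ps, q ≠ p) :
    ∀ s, pvRepl (pvScan ps s) p = pvScan (ps ++ [p]) s := by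
  have hpne : p ≠ [] := pvPhrase_ne_nil p hp
  have hne' : ∀ q ∈ ps, q ≠ [] := fun q hq => pvPhrase_ne_nil q (hsub q hq)
  have hne'' : ∀ q ∈ ps ++ [p], q ≠ [] := by
    intro q hq
    rcases List.mem_append.mp hq with h | h
    · exact hne' q h
    · simp at h; subst h; exact hpne
  have hpl : 1 ≤ p.length := by
    cases p with | nil => exact absurd rfl hpne | cons _ _ => simp
  suffices H : ∀ n s, s.length ≤ n → pvRepl (pvScan ps s) p = pvScan (ps ++ [p]) s by
    exact fun s => H s.length s le_rfl
  intro n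
  induction n with
  | zero =>
    intro s hn
    have hs : s = [] := by cases s with | nil => rfl | cons a b => simp at hn
    subst hs
    rw [pvScan_nil, pvScan_nil, pvRepl_nil hpne]
  | succ n ih =>
    intro s hn
    cases s with
    | nil => rw [pvScan_nil, pvScan_nil, pvRepl_nil hpne]
    | cons c t =>
      cases hfind : ps.find? (fun q => q.isPrefixOf (c :: t)) with
      | some q =>
        have hqmem := List.mem_of_find?_eq_some hfind
        have hql : 1 ≤ q.length := by
          have := hne' q hqmem
          cases q with | nil => simp at this | cons _ _ => simp
        have hfind' : (ps ++ [p]).find? (fun q => q.isPrefixOf (c :: t)) = some q := by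
          rw [List.find?_append, hfind]; rfl
        rw [pvScan_cons_some hne' hfind, pvScan_cons_some hne'' hfind']
        rw [pvRepl_pass hpne pvClosedB _ (fun k hk => pvRStraddle p hp k hk)]
        rw [ih ((c :: t).drop q.length) (by simp at hn ⊢; omega)]
      | none =>
        by_cases hph : p <+: c :: t
        · obtain ⟨t', ht'⟩ := hph
          have htl : t'.length ≤ n := by
            have := congrArg List.length ht'
            simp at this hn
            omega
          have hscan : pvScan ps (p ++ t') = p ++ pvScan ps t' := by
            apply pvScan_pass
            intro q hq k hk hc
            rw [List.drop_append_of_le_length (le_of_lt hk)] at hc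
            rcases pv_prefix_append_cases hc with hc' | hc'
            · exact (pvPair p hp q (hsub q hq) k hk (Or.inr (Ne.symm (hne q hq)))).1 hc'
            · exact (pvPair p hp q (hsub q hq) k hk (Or.inr (Ne.symm (hne q hq)))).2 hc'
          have hfind' : (ps ++ [p]).find? (fun q => q.isPrefixOf (c :: t)) = some p := by
            rw [List.find?_append, hfind]
            simp [List.isPrefixOf_iff_prefix]
            exact ⟨t', ht'⟩
          rw [← ht', hscan]
          rw [pvRepl_match hpne (List.prefix_append p _), List.drop_left]
          rw [ht', pvScan_cons_some hne'' hfind', ← ht', List.drop_left]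
          rw [ih t' htl]
        · have hfind' : (ps ++ [p]).find? (fun q => q.isPrefixOf (c :: t)) = none := by
            rw [List.find?_append, hfind]
            simp [List.isPrefixOf_iff_prefix]
            exact hph
          rw [pvScan_cons_none hfind, pvScan_cons_none hfind']
          have hnm : ¬ p <+: c :: pvScan ps t := by
            intro hc
            cases p with
            | nil => exact hpne rfl
            | cons a p' =>
              rw [List.cons_prefix_cons] at hc
              obtain ⟨rfl, hp'⟩ := hc
              cases p' with
              | nil => exact hph (by simp)
              | cons b p'' =>
                exact pvScan_no_new_head hsub t (b :: p'')
                  ⟨a :: b :: p'', hp, List.suffix_cons a (b :: p'')⟩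
                  (by simp)
                  (fun hpt => hph (List.cons_prefix_cons.mpr ⟨rfl, hpt⟩)) hp'
          rw [pvRepl_cons_nomatch hpne hnm]
          rw [ih t (by simpa using hn)]

theorem pvKey : ∀ l : List Char, pvScan pvPhrasesB l =
    pvRepl (pvRepl (pvRepl (pvRepl (pvRepl (pvRepl l
      "how may I help you today?".toList) "How can I assist you?".toList)
      "How can I help you?".toList) "how can I assist you?".toList)
      "how can I help you?".toList) "How may I help you today?".toList := by
  intro l
  rw [show pvPhrasesB = ["how may I help you today?".toList, "How can I assist you?".toList,
        "How can I help you?".toList, "how can I assist you?".toList,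
        "how can I help you?".toList] ++ ["How may I help you today?".toList] from rfl,
    ← pvStep (by decide) (by decide) (by decide),
    show ["how may I help you today?".toList, "How can I assist you?".toList,
        "How can I help you?".toList, "how can I assist you?".toList,
        "how can I help you?".toList] = ["how may I help you today?".toList, "How can I assist you?".toList,
        "How can I help you?".toList, "how can I assist you?".toList] ++ ["how can I help you?".toList] from rfl,
    ← pvStep (by decide) (by decide) (by decide),
    show ["how may I help you today?".toList, "How can I assist you?".toList,
        "How can I help you?".toList, "how can I assist you?".toList] = ["how may I help you today?".toList, "How can I assist you?".toList,
        "How can I help you?".toList] ++ ["how can I assist you?".toList] from rfl,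
    ← pvStep (by decide) (by decide) (by decide),
    show ["how may I help you today?".toList, "How can I assist you?".toList,
        "How can I help you?".toList] = ["how may I help you today?".toList, "How can I assist you?".toList] ++ ["How can I help you?".toList] from rfl,
    ← pvStep (by decide) (by decide) (by decide),
    show ["how may I help you today?".toList, "How can I assist you?".toList] = ["how may I help you today?".toList] ++ ["How can I assist you?".toList] from rfl,
    ← pvStep (by decide) (by decide) (by decide),
    show ["how may I help you today?".toList] = [] ++ ["how may I help you today?".toList] from rfl,
    ← pvStep (by decide) (by decide) (by decide),
    pvScan_nil_phrases]

-- ===== VERDICT (by name: the statement is the Claim_ definition above) =====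
theorem make_after_hours_greeting_py_spec : Claim_equal_make_after_hours_greeting_py := by
  intro greeting company _
  unfold Spec_make_after_hours_greeting_py
  unfold make_after_hours_greeting_py make_after_hours_greeting_py_alt
  by_cases hg : greeting = ""
  · simp [hg]
  · rw [if_neg hg, if_neg hg]
    simp only [pvPhrasesA, List.foldl_cons, List.foldl_nil]
    simp only [PySem.Str.replace, String.toList_ofList]
    rw [pvKey greeting.toList]
    simp only [pvRepl, pvClosedB, pvClosedA]
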